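-- pv_equiv track=rewrite | github.com/megascienta/sciona | src/sciona/code_analysis/artifacts/call_resolution_python.py | _module_ancestors
-- ===== SOURCE A (Python) =====
-- def _module_ancestors(module_name: str) -> set[str]:
--     parts = [part for part in module_name.split(".") if part]
--     if len(parts) < 2:
--         return set()
--     ancestors: set[str] = set()
--     for end in range(len(parts) - 1, 0, -1):
--         ancestors.add(".".join(parts[:end]))
--     return ancestors
-- ===== SOURCE B (Python) =====
-- def _module_ancestors(module_name: str) -> set[str]:
--     cur = ".".join(p for p in module_name.split(".") if p)
--     ancestors: set[str] = set()
--     while "." in cur: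
--         cur = cur[:cur.rfind(".")]
--         ancestors.add(cur)
--     return ancestors
-- ===== Notes on version B (the rewrite author's own statement) =====
-- stated objective: alternative
-- what changed: Instead of guarding on part count and re-joining every left slice of the parts list over a countdown range, B joins the parts once and repeatedly truncates one running string at its last dot until no dot remains, collecting each truncation.
import Mathlib
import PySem

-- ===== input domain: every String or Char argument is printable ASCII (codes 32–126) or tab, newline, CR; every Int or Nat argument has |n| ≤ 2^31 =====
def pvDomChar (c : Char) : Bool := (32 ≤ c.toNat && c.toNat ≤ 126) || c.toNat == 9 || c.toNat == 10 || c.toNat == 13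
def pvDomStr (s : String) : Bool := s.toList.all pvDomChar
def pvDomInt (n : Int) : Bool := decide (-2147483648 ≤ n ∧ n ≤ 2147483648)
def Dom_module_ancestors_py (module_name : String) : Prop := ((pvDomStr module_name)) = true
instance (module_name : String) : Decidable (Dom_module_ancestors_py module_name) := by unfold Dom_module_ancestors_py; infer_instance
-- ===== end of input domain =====

-- B replaces A's part-count guard and countdown of re-joined left slices by one running
-- string truncated at its last dot until no dot remains (objective: alternative decomposition).

-- ===== PORT A =====

def module_ancestors_py (module_name : String) : List String :=
  let parts := ((PySem.Str.split? module_name ".").getD []).filter (fun p => p != "")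
  if parts.length < 2 then []
  else
    (PySem.List.pyRange ((parts.length : Int) - 1) 0 (-1)).foldl
      (fun ancestors e =>
        PySem.Set.add ancestors (PySem.Str.join "." (PySem.List.slice parts none (some e))))
      PySem.Set.empty

-- ===== PORT B =====
-- helper facts for the loop's termination (cited by pvPeel's decreasing_by)

lemma pv_dot_toList : (".": String).toList = ['.'] := rfl

lemma pv_isIn_dot (s : List Char) : PySem.Chars.isIn ['.'] s = true ↔ '.' ∈ s := by
  rw [PySem.Chars.isIn_iff_infix]
  constructor
  · intro h; exact h.subset (by simp)
  · intro h
    obtain ⟨a, b, rfl⟩ := List.append_of_mem h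
    exact ⟨a, b, by simp⟩

lemma pv_drop_no_dot (b : List Char) (hb : '.' ∉ b) (k : Nat) :
    ['.'].isPrefixOf (b.drop k) = false := by
  cases hd : b.drop k with
  | nil => simp [List.isPrefixOf]
  | cons c t =>
    have hc : c ∈ b :=
      List.mem_of_mem_drop (l := b) (i := k) (by rw [hd]; exact List.mem_cons_self)
    have : c ≠ '.' := fun h => hb (h ▸ hc)
    simp [List.isPrefixOf, this.symm]

lemma pv_rfind_go_last (a b : List Char) (hb : '.' ∉ b) :
    ∀ i, a.length ≤ i → PySem.Chars.rfind.go (a ++ '.' :: b) ['.'] i = (a.length : Int) := by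
  intro i
  induction i with
  | zero =>
    intro h
    have ha : a = [] := List.eq_nil_of_length_eq_zero (Nat.le_zero.mp h)
    subst ha
    simp [PySem.Chars.rfind.go, List.isPrefixOf]
  | succ j ih =>
    intro h
    rw [PySem.Chars.rfind.go]
    rcases Nat.eq_or_lt_of_le h with heq | hgt
    · rw [List.drop_left' heq]
      simp [List.isPrefixOf, heq]
    · have hj : a.length ≤ j := by omega
      have hdrop : (a ++ '.' :: b).drop (j+1) = b.drop (j - a.length) := by
        rw [List.drop_append]
        have h1 : a.drop (j+1) = [] := List.drop_eq_nil_of_le (by omega)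
        have h2 : j + 1 - a.length = (j - a.length) + 1 := by omega
        rw [h1, h2]
        simp
      rw [hdrop, pv_drop_no_dot b hb]
      simpa using ih hj

lemma pv_rfind_last (a b : List Char) (hb : '.' ∉ b) :
    PySem.Chars.rfind (a ++ '.' :: b) ['.'] = (a.length : Int) := by
  unfold PySem.Chars.rfind
  exact pv_rfind_go_last a b hb _ (by simp)

lemma pv_last_dot (s : List Char) (h : '.' ∈ s) :
    ∃ a b, s = a ++ '.' :: b ∧ '.' ∉ b := by
  induction s with
  | nil => simp at h
  | cons c t ih =>
    by_cases ht : '.' ∈ t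
    · obtain ⟨a, b, rfl, hb⟩ := ih ht
      exact ⟨c :: a, b, rfl, hb⟩
    · have hc : c = '.' := by
        rcases List.mem_cons.mp h with h | h
        · exact h.symm
        · exact absurd h ht
      exact ⟨[], t, by rw [hc]; rfl, ht⟩

lemma pvPeel_dec (cur : String) (h : PySem.Str.isIn "." cur = true) :
    (PySem.Str.slice cur none (some (PySem.Str.rfind cur "."))).toList.length
      < cur.toList.length := by
  rw [PySem.Str.isIn_eq, pv_dot_toList] at h
  obtain ⟨a, b, hs, hb⟩ := pv_last_dot cur.toList ((pv_isIn_dot _).mp h)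
  rw [PySem.Str.toList_slice, PySem.Str.rfind_eq, pv_dot_toList, hs,
    pv_rfind_last a b hb, PySem.Chars.slice, PySem.List.slice_to _ (by positivity),
    Int.toNat_natCast, List.take_left]
  simp

def pvPeel (cur : String) (ancestors : PySem.Set String) : PySem.Set String :=
  if h : PySem.Str.isIn "." cur = true then
    let parent := PySem.Str.slice cur none (some (PySem.Str.rfind cur "."))
    pvPeel parent (PySem.Set.add ancestors parent)
  else ancestors
termination_by cur.toList.length
decreasing_by exact pvPeel_dec cur h

def module_ancestors_py_alt (module_name : String) : List String :=
  let cur := PySem.Str.join "."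
    (((PySem.Str.split? module_name ".").getD []).filter (fun p => p != ""))
  pvPeel cur PySem.Set.empty

-- ===== PRECONDITION & SPEC =====
def Spec_module_ancestors_py (module_name : String) (out : List String) : Prop := out = module_ancestors_py_alt module_name
instance (module_name : String) (out : List String) : Decidable (Spec_module_ancestors_py module_name out) := by unfold Spec_module_ancestors_py; infer_instance

-- ===== CLAIM (what is proved, stated in full; the proofs are below) =====
def Claim_equal_module_ancestors_py : Prop := ∀ (module_name : String), Dom_module_ancestors_py module_name → Spec_module_ancestors_py module_name (module_ancestors_py module_name)

-- ===== LEMMAS AND PROOFS =====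

lemma pv_join_append_singleton (ps : List (List Char)) (p : List Char) (h : ps ≠ []) :
    PySem.Chars.join ['.'] (ps ++ [p]) = PySem.Chars.join ['.'] ps ++ '.' :: p := by
  induction ps with
  | nil => simp at h
  | cons q rest ih =>
    cases rest with
    | nil => simp [PySem.Chars.join_cons_cons, PySem.Chars.join_singleton]
    | cons r rs =>
      have h1 := PySem.Chars.join_cons_cons ['.'] q r (rs ++ [p])
      have h2 := PySem.Chars.join_cons_cons ['.'] q r rs
      rw [show (q :: r :: rs ++ [p] : List (List Char)) = q :: r :: (rs ++ [p]) from rfl,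
        h1, show (r :: (rs ++ [p]) : List (List Char)) = (r :: rs) ++ [p] from rfl,
        ih (by simp), h2]
      simp

lemma pv_splitOn_go_no_dot :
    ∀ (fuel : Nat) (l cur : List Char) (acc : List (List Char)), l.length < fuel →
      '.' ∉ cur → (∀ q ∈ acc, '.' ∉ q) →
      ∀ q ∈ PySem.Chars.splitOn.go ['.'] fuel l cur acc, '.' ∉ q := by
  intro fuel
  induction fuel with
  | zero => intro l cur acc h; omega
  | succ f ih =>
    intro l cur acc hlen hcur hacc q hq
    cases l with
    | nil =>
      simp only [PySem.Chars.splitOn.go] at hq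
      simp at hq
      rcases hq with h | h
      · exact hacc q h
      · exact h ▸ (by simpa using hcur)
    | cons c rest =>
      simp only [PySem.Chars.splitOn.go] at hq
      by_cases hc : c = '.'
      · simp [List.isPrefixOf, hc] at hq
        refine ih rest [] (cur.reverse :: acc) (by simpa using hlen) (by simp) ?_ q hq
        intro q hqmem
        rcases List.mem_cons.mp hqmem with h | h
        · exact h ▸ (by simpa using hcur)
        · exact hacc q h
      · simp [List.isPrefixOf, Ne.symm hc] at hq
        refine ih rest (c :: cur) acc (by simpa using hlen) ?_ hacc q hq
        exact fun h => hc ((List.mem_cons.mp h).elim (fun e => e) (fun hm => absurd hm hcur)).symm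

lemma pv_parts_no_dot (s : String) :
    ∀ p ∈ ((PySem.Str.split? s ".").getD []).filter (fun p => p != ""),
      '.' ∉ p.toList := by
  intro p hp
  have hp1 : p ∈ (PySem.Str.split? s ".").getD [] := (List.mem_filter.mp hp).1
  simp only [PySem.Str.split?, pv_dot_toList, PySem.Chars.split?, List.isEmpty] at hp1
  simp at hp1
  obtain ⟨q, hq, rfl⟩ := hp1
  rw [String.toList_ofList]
  exact pv_splitOn_go_no_dot (s.toList.length + 1) s.toList [] [] (by omega) (by simp)
    (by simp) q (by simpa [PySem.Chars.splitOn] using hq)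

lemma pv_join_take_len_mono_chars (qs : List (List Char)) :
    ∀ b a : Nat, 1 ≤ a → a < b → b ≤ qs.length →
      (PySem.Chars.join ['.'] (qs.take a)).length
        < (PySem.Chars.join ['.'] (qs.take b)).length := by
  intro b
  induction b with
  | zero => omega
  | succ c ih =>
    intro a h1 hab hble
    have hc : c < qs.length := by omega
    have htake : qs.take (c+1) = qs.take c ++ [qs[c]] := List.take_succ_eq_append_getElem hc
    have hne : qs.take c ≠ [] := by
      have : (qs.take c).length = c := List.length_take_of_le (by omega)
      intro h; rw [h] at this; simp at this; omega
    have hjoin : PySem.Chars.join ['.'] (qs.take (c+1))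
        = PySem.Chars.join ['.'] (qs.take c) ++ '.' :: qs[c] := by
      rw [htake, pv_join_append_singleton _ _ hne]
    rcases Nat.eq_or_lt_of_le (Nat.le_of_lt_succ hab) with heq | hlt
    · subst heq; rw [hjoin]; simp
    · have := ih a h1 hlt (by omega)
      rw [hjoin]; simp; omega

def pvChain (parts : List String) : List String :=
  (PySem.List.pyRange ((parts.length : Int) - 1) 0 (-1)).map
    (fun e => PySem.Str.join "." (PySem.List.slice parts none (some e)))

lemma pv_toList_join_dot (parts : List String) :
    (PySem.Str.join "." parts).toList
      = PySem.Chars.join ['.'] (parts.map String.toList) := by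
  rw [PySem.Str.toList_join, pv_dot_toList]

lemma pv_peel_spec :
    ∀ (n : Nat) (parts : List String), parts.length = n →
      (∀ p ∈ parts, '.' ∉ p.toList) →
      ∀ acc : List String,
        (∀ x ∈ acc, (PySem.Str.join "." parts).toList.length ≤ x.toList.length) →
        pvPeel (PySem.Str.join "." parts) acc = acc ++ pvChain parts := by
  intro n
  induction n using Nat.strong_induction_on with
  | _ n ih =>
    intro parts hlen hdf acc hacc
    by_cases hsmall : parts.length < 2
    · have hno : ¬ PySem.Str.isIn "." (PySem.Str.join "." parts) = true := by
        rw [PySem.Str.isIn_eq, pv_dot_toList, pv_toList_join_dot]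
        intro hIs
        have hmem := (pv_isIn_dot _).mp hIs
        match parts, hsmall with
        | [], _ => simp [PySem.Chars.join_nil] at hmem
        | [q], _ =>
          rw [List.map_singleton, PySem.Chars.join_singleton] at hmem
          exact hdf q (by simp) hmem
      rw [pvPeel, dif_neg hno]
      have : PySem.List.pyRange ((parts.length : Int) - 1) 0 (-1) = [] :=
        PySem.List.pyRange_neg_one_eq_nil (by omega)
      rw [pvChain, this]
      simp
    · -- step: parts = ps ++ [p]
      have hne : parts ≠ [] := by intro h; rw [h] at hsmall; simp at hsmall
      set ps := parts.dropLast with hps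
      set p := parts.getLast hne with hp
      have hsplit : ps ++ [p] = parts := List.dropLast_append_getLast hne
      have hlps : ps.length = parts.length - 1 := by
        have := congrArg List.length hsplit; simp at this; omega
      have hpsne : ps ≠ [] := by
        intro h; rw [h] at hlps; simp at hlps; omega
      have hbdot : '.' ∉ p.toList := hdf p (List.getLast_mem hne)
      have hJ : (PySem.Str.join "." parts).toList
          = PySem.Chars.join ['.'] (ps.map String.toList) ++ '.' :: p.toList := by
        rw [pv_toList_join_dot, ← hsplit, List.map_append, List.map_singleton,
          pv_join_append_singleton _ _ (by simpa using hpsne)]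
      set A := PySem.Chars.join ['.'] (ps.map String.toList) with hA
      have hAeq : (PySem.Str.join "." ps).toList = A := pv_toList_join_dot ps
      have hIs : PySem.Str.isIn "." (PySem.Str.join "." parts) = true := by
        rw [PySem.Str.isIn_eq, pv_dot_toList, hJ]
        exact (pv_isIn_dot _).mpr (by simp)
      rw [pvPeel, dif_pos hIs]
      have hr : PySem.Str.rfind (PySem.Str.join "." parts) "." = (A.length : Int) := by
        rw [PySem.Str.rfind_eq, pv_dot_toList, hJ, pv_rfind_last _ _ hbdot]
      have hparent : PySem.Str.slice (PySem.Str.join "." parts) none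
          (some (PySem.Str.rfind (PySem.Str.join "." parts) ".")) = PySem.Str.join "." ps := by
        apply String.toList_inj.mp
        rw [PySem.Str.toList_slice, hr, PySem.Chars.slice,
          PySem.List.slice_to _ (by positivity), Int.toNat_natCast, hJ, List.take_left, hAeq]
      rw [hparent]
      have hlenlt : A.length < (PySem.Str.join "." parts).toList.length := by
        rw [hJ]; simp
      have hnotmem : PySem.Str.join "." ps ∉ acc := by
        intro hmem
        have h1 := hacc _ hmem
        rw [hAeq] at h1
        omega
      have hadd : PySem.Set.add acc (PySem.Str.join "." ps) = acc ++ [PySem.Str.join "." ps] := by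
        unfold PySem.Set.add PySem.Set.contains
        rw [if_neg]
        simp
        exact hnotmem
      show pvPeel (PySem.Str.join "." ps)
        (PySem.Set.add acc (PySem.Str.join "." ps)) = acc ++ pvChain parts
      rw [hadd]
      have hrec := ih (n-1) (by omega) ps (by omega) (fun q hq => hdf q ((List.dropLast_sublist (l := parts)).subset hq))
        (acc ++ [PySem.Str.join "." ps]) ?inv
      case inv =>
        intro x hx
        rcases List.mem_append.mp hx with hx | hx
        · have := hacc x hx
          rw [hAeq]
          omega
        · simp at hx
          rw [hx, hAeq]
      have hcons : PySem.List.pyRange ((parts.length : Int) - 1) 0 (-1)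
          = ((parts.length : Int) - 1) :: PySem.List.pyRange ((parts.length : Int) - 2) 0 (-1) := by
        rw [PySem.List.pyRange_neg_one_cons (by omega),
          show ((parts.length : Int) - 1) - 1 = (parts.length : Int) - 2 by ring]
      have hhead : PySem.Str.join "." (PySem.List.slice parts none (some ((parts.length : Int) - 1)))
          = PySem.Str.join "." ps := by
        rw [PySem.List.slice_to _ (by omega)]
        congr 1
        rw [show ((parts.length : Int) - 1).toNat = parts.length - 1 by omega,
          ← List.dropLast_eq_take]
      have htail : (PySem.List.pyRange ((parts.length : Int) - 2) 0 (-1)).map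
            (fun e => PySem.Str.join "." (PySem.List.slice parts none (some e)))
          = pvChain ps := by
        rw [pvChain, hlps,
          show ((parts.length - 1 : Nat) : Int) - 1 = (parts.length : Int) - 2 by omega]
        apply List.map_congr_left
        intro e he
        have hee := PySem.List.mem_pyRange_neg_one.mp he
        congr 1
        rw [PySem.List.slice_to _ (by omega), PySem.List.slice_to _ (by omega), ← hsplit,
          List.take_append_of_le_length (by omega)]
      have hstep : pvChain parts = PySem.Str.join "." ps :: pvChain ps := by
        rw [pvChain, hcons, List.map_cons, hhead, htail]
      rw [hrec, hstep, List.append_assoc]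
      simp

lemma pv_join_take_len_mono (parts : List String) (a b : Nat) (h1 : 1 ≤ a) (hab : a < b)
    (hb : b ≤ parts.length) :
    (PySem.Str.join "." (parts.take a)).toList.length
      < (PySem.Str.join "." (parts.take b)).toList.length := by
  rw [pv_toList_join_dot, pv_toList_join_dot, List.map_take, List.map_take]
  exact pv_join_take_len_mono_chars (parts.map String.toList) b a h1 hab (by simpa using hb)

lemma pv_chain_nodup (parts : List String) : (pvChain parts).Nodup := by
  rw [pvChain]
  apply List.Nodup.map_on
  · intro x hx y hy hxy
    have hxm := PySem.List.mem_pyRange_neg_one.mp hx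
    have hym := PySem.List.mem_pyRange_neg_one.mp hy
    rw [PySem.List.slice_to _ (by omega), PySem.List.slice_to _ (by omega)] at hxy
    by_contra hne
    rcases lt_trichotomy x y with h | h | h
    · have := pv_join_take_len_mono parts x.toNat y.toNat (by omega) (by omega) (by omega)
      rw [hxy] at this
      omega
    · exact hne h
    · have := pv_join_take_len_mono parts y.toNat x.toNat (by omega) (by omega) (by omega)
      rw [hxy] at this
      omega
  · rw [PySem.List.pyRange_neg_one_eq_reverse]
    exact List.nodup_reverse.mpr (PySem.List.nodup_pyRange_one _ _)

lemma pv_fold_spec (parts : List String) :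
    (PySem.List.pyRange ((parts.length : Int) - 1) 0 (-1)).foldl
      (fun ancestors e =>
        PySem.Set.add ancestors (PySem.Str.join "." (PySem.List.slice parts none (some e))))
      PySem.Set.empty = pvChain parts := by
  have h1 : (PySem.List.pyRange ((parts.length : Int) - 1) 0 (-1)).foldl
      (fun ancestors e =>
        PySem.Set.add ancestors (PySem.Str.join "." (PySem.List.slice parts none (some e))))
      PySem.Set.empty = (pvChain parts).foldl PySem.Set.add [] := by
    rw [pvChain, List.foldl_map]
    rfl
  rw [h1]
  have h3 := PySem.Set.update_eq_append_of_disjoint ([] : PySem.Set String) (pvChain parts)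
    (pv_chain_nodup parts) (by simp)
  simpa [PySem.Set.update] using h3

-- ===== VERDICT (by name: the statement is the Claim_ definition above) =====
theorem module_ancestors_py_spec : Claim_equal_module_ancestors_py := by
  intro module_name _
  unfold Spec_module_ancestors_py
  unfold module_ancestors_py module_ancestors_py_alt
  set parts := ((PySem.Str.split? module_name ".").getD []).filter (fun p => p != "") with hparts
  have hdf := pv_parts_no_dot module_name
  rw [← hparts] at hdf
  have hB : pvPeel (PySem.Str.join "." parts) PySem.Set.empty = pvChain parts := by
    have := pv_peel_spec parts.length parts rfl hdf [] (by simp)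
    simpa [PySem.Set.empty] using this
  rw [hB]
  by_cases h2 : parts.length < 2
  · rw [if_pos h2, pvChain, PySem.List.pyRange_neg_one_eq_nil (by omega)]
    simp
  · rw [if_neg h2, pv_fold_spec parts]
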